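-- pv_equiv track=rewrite | github.com/S-DPR/DSA | PS/Python/CF_R939_D (Nene and the Mex Operator).py | create_oper
-- ===== SOURCE A (Python) =====
-- def create_oper(l, r):
--     def go(k):
--         if k == l: return [[k, k]]
--         ret = go(k-1)
--         for i in range(k-2, l-1, -1):
--             ret.append([l, i])
--             ret.extend(go(i))
--         ret.append([l, k])
--         return ret
--     return go(r)
-- ===== SOURCE B (Python) =====
-- def create_oper(l, r):
--     g = {l: [[l, l]]}
--     for k in range(l + 1, r + 1):
--         cur = list(g[k - 1])
--         for i in range(k - 2, l - 1, -1):
--             cur.append([l, i])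
--             cur.extend(g[i])
--         cur.append([l, k])
--         g[k] = cur
--     return g[r]
-- ===== Notes on version B (the rewrite author's own statement) =====
-- stated objective: alternative
-- what changed: Replaces the recursive go(k) with an iterative bottom-up table g[l..r]: each g[k] is built once from the already-stored g[k-1] and g[i] (extended by reference) instead of rebuilding every sub-sequence by fresh recursion.
import Mathlib
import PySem

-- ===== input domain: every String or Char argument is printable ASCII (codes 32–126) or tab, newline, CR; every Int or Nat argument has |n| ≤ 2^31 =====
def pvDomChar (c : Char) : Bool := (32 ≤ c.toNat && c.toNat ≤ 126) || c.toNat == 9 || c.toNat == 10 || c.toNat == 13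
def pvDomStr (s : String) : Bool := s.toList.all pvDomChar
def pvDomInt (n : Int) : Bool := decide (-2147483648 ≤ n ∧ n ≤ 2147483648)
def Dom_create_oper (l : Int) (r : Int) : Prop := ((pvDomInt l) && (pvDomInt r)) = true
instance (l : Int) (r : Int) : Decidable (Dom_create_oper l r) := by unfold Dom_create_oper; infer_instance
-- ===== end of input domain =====

-- B builds the same operation list bottom-up in a table instead of by recursion; equivalence is about the
-- RETURN VALUE only: Python B's returned list shares inner pair objects where A builds each pair fresh.

-- ===== PORT A =====
-- go(k): fuel = (k - l).toNat bounds the recursion depth; inside Pre_ (l ≤ r) the fuel-0 branch is unreachable.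
def goA (l : Int) : Nat → Int → List (List Int)
  | fuel, k =>
    if k = l then [[k, k]]
    else
      match fuel with
      | 0 => []
      | f + 1 =>
        let ret := goA l f (k - 1)
        let ret := (PySem.List.pyRange (k - 2) (l - 1) (-1)).foldl
          (fun acc i => (acc ++ [[l, i]]) ++ goA l f i) ret
        ret ++ [[l, k]]

def create_oper (l : Int) (r : Int) : List (List Int) := goA l (r - l).toNat r

-- ===== PORT B =====
def create_oper_alt (l : Int) (r : Int) : List (List Int) :=
  let g0 : PySem.Dict Int (List (List Int)) := PySem.Dict.insert PySem.Dict.empty l [[l, l]]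
  let g := (PySem.List.pyRange (l + 1) (r + 1) 1).foldl
    (fun g k =>
      let cur := PySem.Dict.getD g (k - 1) []          -- list(g[k-1])
      let cur := (PySem.List.pyRange (k - 2) (l - 1) (-1)).foldl
        (fun acc i => (acc ++ [[l, i]]) ++ PySem.Dict.getD g i []) cur
      PySem.Dict.insert g k (cur ++ [[l, k]])) g0
  PySem.Dict.getD g r []                               -- g[r] (KeyError only when r < l, outside Pre_)

-- ===== PRECONDITION & SPEC =====
-- For r < l, A's go never reaches its base case (RecursionError) and B's g[r] is a KeyError.
def Pre_create_oper (l : Int) (r : Int) : Prop := l ≤ r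
instance (l : Int) (r : Int) : Decidable (Pre_create_oper l r) := by unfold Pre_create_oper; infer_instance
def pvWitness_create_oper : Int × Int := (2, 5)
def Spec_create_oper (l : Int) (r : Int) (out : List (List Int)) : Prop := out = create_oper_alt l r
instance (l : Int) (r : Int) (out : List (List Int)) : Decidable (Spec_create_oper l r out) := by unfold Spec_create_oper; infer_instance

-- ===== CLAIM (what is proved, stated in full; the proofs are below) =====
def Claim_equal_create_oper : Prop := ∀ (l : Int) (r : Int), Dom_create_oper l r → Pre_create_oper l r → Spec_create_oper l r (create_oper l r)

-- ===== LEMMAS AND PROOFS =====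

theorem goA_succ (l k : Int) (f : Nat) (h : ¬ k = l) :
    goA l (f + 1) k =
      ((PySem.List.pyRange (k - 2) (l - 1) (-1)).foldl
        (fun acc i => (acc ++ [[l, i]]) ++ goA l f i) (goA l f (k - 1))) ++ [[l, k]] := by
  conv_lhs => rw [goA.eq_def]
  simp [h]

theorem goA_fuel (l : Int) : ∀ (n : Nat) (k : Int) (f f' : Nat), l ≤ k → (k - l).toNat ≤ n →
    (k - l).toNat ≤ f → (k - l).toNat ≤ f' → goA l f k = goA l f' k := by
  intro n
  induction n with
  | zero =>
    intro k f f' hlk hn _ _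
    have hk : k = l := by omega
    subst hk
    rw [goA.eq_def, goA.eq_def]
    simp
  | succ n ih =>
    intro k f f' hlk hn hf hf'
    by_cases hk : k = l
    · subst hk; rw [goA.eq_def, goA.eq_def]; simp
    · have hlt : l < k := lt_of_le_of_ne hlk (fun h => hk h.symm)
      obtain ⟨f0, rfl⟩ : ∃ f0, f = f0 + 1 := ⟨f - 1, by omega⟩
      obtain ⟨f0', rfl⟩ : ∃ f0', f' = f0' + 1 := ⟨f' - 1, by omega⟩
      rw [goA_succ l k f0 hk, goA_succ l k f0' hk]
      have hinit : goA l f0 (k - 1) = goA l f0' (k - 1) :=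
        ih (k - 1) f0 f0' (by omega) (by omega) (by omega) (by omega)
      rw [hinit]
      congr 1
      apply PySem.List.foldl_congr_mem
      intro acc i hi
      rw [PySem.List.mem_pyRange_neg_one] at hi
      have : goA l f0 i = goA l f0' i :=
        ih i f0 f0' (by omega) (by omega) (by omega) (by omega)
      rw [this]

theorem B_inv (l : Int) : ∀ (n : Nat) (j : Int), l ≤ j → j ≤ l + n →
    PySem.Dict.getD
      ((PySem.List.pyRange (l + 1) (l + n + 1) 1).foldl
        (fun g k =>
          let cur := PySem.Dict.getD g (k - 1) []
          let cur := (PySem.List.pyRange (k - 2) (l - 1) (-1)).foldl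
            (fun acc i => (acc ++ [[l, i]]) ++ PySem.Dict.getD g i []) cur
          PySem.Dict.insert g k (cur ++ [[l, k]]))
        (PySem.Dict.insert PySem.Dict.empty l [[l, l]])) j []
    = goA l (j - l).toNat j := by
  intro n
  induction n with
  | zero =>
    intro j hlj hjn
    have hj : j = l := by omega
    rw [show l + ((0 : Nat) : Int) + 1 = l + 1 from by push_cast; ring]
    rw [PySem.List.pyRange_one_eq_nil (by omega)]
    simp only [List.foldl_nil]
    rw [hj, PySem.Dict.getD_insert_self]
    rw [show (l - l).toNat = 0 from by omega]
    rw [goA.eq_def]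
    simp
  | succ n ih =>
    intro j hlj hjn
    rw [show l + ((n + 1 : Nat) : Int) + 1 = (l + (n : Nat) + 1) + 1 from by push_cast; ring]
    rw [PySem.List.pyRange_one_succ_right (by omega)]
    rw [List.foldl_append]
    simp only [List.foldl_cons, List.foldl_nil]
    rw [PySem.Dict.getD_insert]
    split_ifs with hjk
    · -- j = l+n+1 : the freshly inserted row equals goA there
      rw [hjk]
      rw [show (l + (n : Nat) + 1 - l).toNat = n + 1 from by omega]
      rw [goA_succ l (l + (n : Nat) + 1) n (by omega)]
      congr 1
      have hinit := ih (l + (n : Nat) + 1 - 1) (by omega) (by omega)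
      rw [show (l + (n : Nat) + 1 - 1 - l).toNat = n from by omega] at hinit
      rw [hinit]
      apply PySem.List.foldl_congr_mem
      intro acc i hi
      rw [PySem.List.mem_pyRange_neg_one] at hi
      rw [ih i (by omega) (by omega),
        goA_fuel l n i (i - l).toNat n (by omega) (by omega) (by omega) (by omega)]
    · exact ih j hlj (by omega)

-- ===== VERDICT (by name: the statement is the Claim_ definition above) =====
theorem create_oper_spec : Claim_equal_create_oper := by
  intro l r _ hpre
  have hlr : l ≤ r := hpre
  unfold Spec_create_oper create_oper create_oper_alt
  have hr : r = l + ((r - l).toNat : Int) := by omega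
  have := B_inv l (r - l).toNat r hlr (by omega)
  rw [show l + ((r - l).toNat : Int) + 1 = r + 1 from by omega] at this
  exact this.symm
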